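-- pv_equiv track=rewrite | github.com/kentang2017/kinastro | astro/wariga/calculator.py | _get_tumpek_type
-- ===== SOURCE A (Python) =====
-- def _get_tumpek_type(wuku_index: int) -> str:
--     """
--     根據 Wuku 判斷 Tumpek 類型
--
--     每 35 天出現一次 Tumpek（Saniscara + Kliwon），
--     在 210 天週期中共有 6 個 Tumpek，各有不同意義。
--
--     古法依據：Lontar Wariga — Tumpek 分類
--
--     回傳：
--         str: Tumpek 類型名稱
--     """
--     # 6 種 Tumpek 類型，按 Wuku 範圍劃分
--     tumpek_types = {
--         (0, 4):   "Tumpek Landep（器具日）",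
--         (5, 9):   "Tumpek Uduh / Pengatag（植物日）",
--         (10, 14): "Tumpek Kuningan（祖靈日）",
--         (15, 19): "Tumpek Krulut（音樂/藝術日）",
--         (20, 24): "Tumpek Kandang（動物日）",
--         (25, 29): "Tumpek Wayang（皮影戲日）",
--     }
--     for (low, high), name in tumpek_types.items():
--         if low <= wuku_index <= high:
--             return name
--     return "Tumpek（未分類）"
-- ===== SOURCE B (Python) =====
-- _TUMPEK_NAMES = [
--     "Tumpek Landep（器具日）",
--     "Tumpek Uduh / Pengatag（植物日）",
--     "Tumpek Kuningan（祖靈日）",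
--     "Tumpek Krulut（音樂/藝術日）",
--     "Tumpek Kandang（動物日）",
--     "Tumpek Wayang（皮影戲日）",
-- ]
--
-- def _get_tumpek_type(wuku_index: int) -> str:
--     if 0 <= wuku_index <= 29:
--         return _TUMPEK_NAMES[wuku_index // 5]
--     return "Tumpek（未分類）"
-- ===== Notes on version B (the rewrite author's own statement) =====
-- stated objective: simpler
-- what changed: Replaces the loop over range-tuple dict keys with a single bounds check and an arithmetic bucket lookup (names[wuku_index // 5]) into a flat list.
import Mathlib
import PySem

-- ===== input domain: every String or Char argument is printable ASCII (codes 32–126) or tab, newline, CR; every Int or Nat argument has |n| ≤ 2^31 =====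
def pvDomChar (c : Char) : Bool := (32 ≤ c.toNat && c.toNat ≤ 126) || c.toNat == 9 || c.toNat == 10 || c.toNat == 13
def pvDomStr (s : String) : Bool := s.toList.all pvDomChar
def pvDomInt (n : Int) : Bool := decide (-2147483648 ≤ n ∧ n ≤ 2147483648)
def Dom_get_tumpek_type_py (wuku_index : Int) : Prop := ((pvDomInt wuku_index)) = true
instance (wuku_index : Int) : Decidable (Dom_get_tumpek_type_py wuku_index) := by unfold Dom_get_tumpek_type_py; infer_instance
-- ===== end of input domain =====

-- B replaces A's scan over range-tuple dict keys with one bounds check and an arithmetic bucket lookup (simpler).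


-- ===== PORT A =====
-- A loops over the dict's (low, high) → name items in insertion order, returning the first
-- matching range's name, else the default. Transliterated as a fold with early result.
def getTumpekTypesA : List ((Int × Int) × String) :=
  [((0, 4),   "Tumpek Landep（器具日）"),
   ((5, 9),   "Tumpek Uduh / Pengatag（植物日）"),
   ((10, 14), "Tumpek Kuningan（祖靈日）"),
   ((15, 19), "Tumpek Krulut（音樂/藝術日）"),
   ((20, 24), "Tumpek Kandang（動物日）"),
   ((25, 29), "Tumpek Wayang（皮影戲日）")]

def getTumpekLoopA (wuku_index : Int) : List ((Int × Int) × String) → String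
  | [] => "Tumpek（未分類）"
  | ((low, high), name) :: rest =>
      if low ≤ wuku_index ∧ wuku_index ≤ high then name
      else getTumpekLoopA wuku_index rest

def get_tumpek_type_py (wuku_index : Int) : String :=
  getTumpekLoopA wuku_index getTumpekTypesA

-- ===== PORT B =====
def tumpekNamesB : List String :=
  ["Tumpek Landep（器具日）",
   "Tumpek Uduh / Pengatag（植物日）",
   "Tumpek Kuningan（祖靈日）",
   "Tumpek Krulut（音樂/藝術日）",
   "Tumpek Kandang（動物日）",
   "Tumpek Wayang（皮影戲日）"]

-- Source B's names[wuku_index // 5]: the index is provably in range under the guard, so the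
-- list access (pyGet?) always returns; .getD "" only discharges the Option.
def get_tumpek_type_py_alt (wuku_index : Int) : String :=
  if 0 ≤ wuku_index ∧ wuku_index ≤ 29 then
    (PySem.List.pyGet? tumpekNamesB (PySem.Int.floordiv wuku_index 5)).getD ""
  else "Tumpek（未分類）"

-- ===== PRECONDITION & SPEC =====
def Spec_get_tumpek_type_py (wuku_index : Int) (out : String) : Prop := out = get_tumpek_type_py_alt wuku_index
instance (wuku_index : Int) (out : String) : Decidable (Spec_get_tumpek_type_py wuku_index out) := by unfold Spec_get_tumpek_type_py; infer_instance

-- ===== CLAIM (what is proved, stated in full; the proofs are below) =====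
def Claim_equal_get_tumpek_type_py : Prop := ∀ (wuku_index : Int), Dom_get_tumpek_type_py wuku_index → Spec_get_tumpek_type_py wuku_index (get_tumpek_type_py wuku_index)

-- ===== LEMMAS AND PROOFS =====

-- ===== VERDICT (by name: the statement is the Claim_ definition above) =====
theorem get_tumpek_type_py_spec : Claim_equal_get_tumpek_type_py := by
  intro i _
  show get_tumpek_type_py i = get_tumpek_type_py_alt i
  by_cases h : 0 ≤ i ∧ i ≤ 29
  · obtain ⟨h0, h29⟩ := h
    interval_cases i <;> decide
  · simp only [get_tumpek_type_py, getTumpekTypesA, getTumpekLoopA,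
      get_tumpek_type_py_alt, if_neg h]
    split_ifs with h1 h2 h3 h4 h5 h6 <;> first | rfl | omega
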